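-- pv_equiv track=rewrite | github.com/NicolasFacciano/TP1_Sintaxis | AFDs.py | automata_program
-- ===== SOURCE A (Python) =====
-- ESTADO_FINAL = "ESTADO FINAL"
--
-- ESTADO_NO_FINAL = "NO ACEPTADO"
--
-- ESTADO_TRAMPA = "EN ESTADO TRAMPA"
--
-- def automata_program(lexema):
--     estado = 0
--     estados_finales = [7]
--     for caracter in lexema:
--         if estado == 0 and caracter == 'p':
--             estado = 1
--         elif estado == 1 and caracter == 'r':
--             estado = 2
--         elif estado == 2 and caracter == 'o':
--             estado = 3
--         elif estado == 3 and caracter == 'g':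
--             estado = 4
--         elif estado == 4 and caracter == 'r':
--             estado = 5
--         elif estado == 5 and caracter == 'a':
--             estado = 6
--         elif estado == 6 and caracter == 'm':
--             estado = 7
--         else:
--             estado = -1
--             break
--     if estado == -1:
--         return ESTADO_TRAMPA
--     if estado in estados_finales:
--         return ESTADO_FINAL
--     return ESTADO_NO_FINAL
-- ===== SOURCE B (Python) =====
-- ESTADO_FINAL = "ESTADO FINAL"
-- ESTADO_NO_FINAL = "NO ACEPTADO"
-- ESTADO_TRAMPA = "EN ESTADO TRAMPA"
--
-- def automata_program(lexema):
--     # No state machine: classify the whole lexeme against the pattern at once.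
--     target = "program"
--     if lexema == target:
--         return ESTADO_FINAL
--     if target.startswith(lexema):
--         return ESTADO_NO_FINAL
--     return ESTADO_TRAMPA
-- ===== Notes on version B (the rewrite author's own statement) =====
-- stated objective: simpler
-- what changed: Replaces the seven-branch character-by-character state machine with two whole-string comparisons: equality with 'program' and a startswith prefix test, no loop or state variable at all.
import Mathlib
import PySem

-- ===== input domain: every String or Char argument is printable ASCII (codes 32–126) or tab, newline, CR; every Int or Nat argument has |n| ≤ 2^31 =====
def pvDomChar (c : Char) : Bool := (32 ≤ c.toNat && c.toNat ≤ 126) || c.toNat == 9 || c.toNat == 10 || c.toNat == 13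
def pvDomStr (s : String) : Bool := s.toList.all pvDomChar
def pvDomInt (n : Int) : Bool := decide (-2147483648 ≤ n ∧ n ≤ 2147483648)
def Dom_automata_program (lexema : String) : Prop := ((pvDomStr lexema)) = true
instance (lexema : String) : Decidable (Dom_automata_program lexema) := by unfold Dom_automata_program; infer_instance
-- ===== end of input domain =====

-- B replaces A's seven-branch per-character state machine by two whole-string
-- comparisons (equality with "program", then a startswith prefix test): simpler.

-- ===== PORT A =====
def ESTADO_FINAL : String := "ESTADO FINAL"
def ESTADO_NO_FINAL : String := "NO ACEPTADO"
def ESTADO_TRAMPA : String := "EN ESTADO TRAMPA"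

-- A's for-loop with break: returns the final 'estado' (-1 encodes the break)
def loopA : List Char → Int → Int
  | [], e => e
  | c :: cs, e =>
    if e == 0 && c == 'p' then loopA cs 1
    else if e == 1 && c == 'r' then loopA cs 2
    else if e == 2 && c == 'o' then loopA cs 3
    else if e == 3 && c == 'g' then loopA cs 4
    else if e == 4 && c == 'r' then loopA cs 5
    else if e == 5 && c == 'a' then loopA cs 6
    else if e == 6 && c == 'm' then loopA cs 7
    else (-1)

def automata_program (lexema : String) : String :=
  let estados_finales : List Int := [7]
  let estado := loopA lexema.toList 0
  if estado = -1 then ESTADO_TRAMPA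
  else if estado ∈ estados_finales then ESTADO_FINAL
  else ESTADO_NO_FINAL

-- ===== PORT B =====
def automata_program_alt (lexema : String) : String :=
  let target : String := "program"
  if lexema == target then ESTADO_FINAL
  else if PySem.Str.startswith target lexema then ESTADO_NO_FINAL
  else ESTADO_TRAMPA

-- ===== PRECONDITION & SPEC =====
def Spec_automata_program (lexema : String) (out : String) : Prop := out = automata_program_alt lexema
instance (lexema : String) (out : String) : Decidable (Spec_automata_program lexema out) := by unfold Spec_automata_program; infer_instance

-- ===== CLAIM (what is proved, stated in full; the proofs are below) =====
def Claim_equal_automata_program : Prop := ∀ (lexema : String), Dom_automata_program lexema → Spec_automata_program lexema (automata_program lexema)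

-- ===== LEMMAS AND PROOFS =====
-- Characterisation of A's loop by suffix of the pattern: from state i the loop
-- ends in FINAL iff the rest of the input equals the rest of "program",
-- in NO_FINAL iff it is a proper prefix of it, else in the trap.
theorem loop_char : ∀ (cs : List Char) (i : Nat), i ≤ 7 →
    (if loopA cs (i : Int) = -1 then ESTADO_TRAMPA
     else if loopA cs (i : Int) ∈ ([7] : List Int) then ESTADO_FINAL
     else ESTADO_NO_FINAL)
    = (if cs = ("program".toList.drop i) then ESTADO_FINAL
       else if cs <+: ("program".toList.drop i) then ESTADO_NO_FINAL
       else ESTADO_TRAMPA) := by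
  intro cs
  induction cs with
  | nil =>
    intro i hi
    interval_cases i <;> simp [loopA, ESTADO_FINAL, ESTADO_NO_FINAL]
  | cons c cs ih =>
    intro i hi
    interval_cases i
    · by_cases hc : c = 'p'
      · have h := ih 1 (by norm_num); push_cast at h
        simpa [loopA, hc, List.cons_prefix_cons] using h
      · simp [loopA, hc, List.cons_prefix_cons, ESTADO_TRAMPA]
    · by_cases hc : c = 'r'
      · have h := ih 2 (by norm_num); push_cast at h
        simpa [loopA, hc, List.cons_prefix_cons] using h
      · simp [loopA, hc, List.cons_prefix_cons, ESTADO_TRAMPA]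
    · by_cases hc : c = 'o'
      · have h := ih 3 (by norm_num); push_cast at h
        simpa [loopA, hc, List.cons_prefix_cons] using h
      · simp [loopA, hc, List.cons_prefix_cons, ESTADO_TRAMPA]
    · by_cases hc : c = 'g'
      · have h := ih 4 (by norm_num); push_cast at h
        simpa [loopA, hc, List.cons_prefix_cons] using h
      · simp [loopA, hc, List.cons_prefix_cons, ESTADO_TRAMPA]
    · by_cases hc : c = 'r'
      · have h := ih 5 (by norm_num); push_cast at h
        simpa [loopA, hc, List.cons_prefix_cons] using h
      · simp [loopA, hc, List.cons_prefix_cons, ESTADO_TRAMPA]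
    · by_cases hc : c = 'a'
      · have h := ih 6 (by norm_num); push_cast at h
        simpa [loopA, hc, List.cons_prefix_cons] using h
      · simp [loopA, hc, List.cons_prefix_cons, ESTADO_TRAMPA]
    · by_cases hc : c = 'm'
      · have h := ih 7 (by norm_num); push_cast at h
        simpa [loopA, hc, List.cons_prefix_cons] using h
      · simp [loopA, hc, List.cons_prefix_cons, ESTADO_TRAMPA]
    · simp [loopA, ESTADO_TRAMPA]

-- ===== VERDICT (by name: the statement is the Claim_ definition above) =====
theorem automata_program_spec : Claim_equal_automata_program := by
  intro lexema _
  unfold Spec_automata_program automata_program automata_program_alt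
  have h := loop_char lexema.toList 0 (by norm_num)
  push_cast at h
  simp only [List.drop_zero] at h
  simp only [h]
  by_cases he : lexema = "program"
  · simp [he]
  · have he' : lexema.toList ≠ ['p', 'r', 'o', 'g', 'r', 'a', 'm'] :=
      fun hl => he (String.toList_injective hl)
    simp [he, he', PySem.Chars.startswith_iff]
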